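-- pv_equiv track=rewrite | github.com/HesamMarshal/PythonTutorial | Pro/loop.py | for_loop_inc_test
-- ===== SOURCE A (Python) =====
-- def for_loop_inc_test(n=100_000_000):
--     sum = 0
--     x = 0
--     for i in range(n):
--         if i < n:
--             pass
--         x += 1
--         sum += i
--     return sum
-- ===== SOURCE B (Python) =====
-- def for_loop_inc_test(n=100_000_000):
--     # closed-form arithmetic series: sum of 0..n-1
--     return n * (n - 1) // 2 if n > 0 else 0
-- ===== Notes on version B (the rewrite author's own statement) =====
-- stated objective: faster
-- what changed: Replaced the O(n) accumulation loop (with its dead counter and no-op branch) by the closed-form arithmetic series n*(n-1)//2.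
import Mathlib
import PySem

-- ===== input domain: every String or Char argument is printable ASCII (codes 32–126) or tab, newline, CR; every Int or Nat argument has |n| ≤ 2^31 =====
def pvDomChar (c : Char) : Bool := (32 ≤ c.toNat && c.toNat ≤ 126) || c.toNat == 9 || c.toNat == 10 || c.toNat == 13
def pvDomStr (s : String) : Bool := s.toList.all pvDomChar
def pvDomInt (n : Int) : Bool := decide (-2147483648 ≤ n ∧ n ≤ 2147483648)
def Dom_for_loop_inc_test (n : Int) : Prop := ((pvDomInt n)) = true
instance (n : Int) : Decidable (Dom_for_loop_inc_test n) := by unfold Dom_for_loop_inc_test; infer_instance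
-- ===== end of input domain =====

-- B replaces A's O(n) summation loop by the closed-form arithmetic series n*(n-1)//2 (objective: faster).


-- ===== PORT A =====
-- faithful port of A: fold over range(n) carrying (sum, x); the no-op 'if i < n: pass' is elided
def for_loop_inc_test (n : Int) : Int :=
  (((PySem.List.pyRange 0 n 1).foldl (fun (st : Int × Int) i => (st.1 + i, st.2 + 1)) (0, 0)).1)

-- ===== PORT B =====
-- B: closed-form arithmetic series
def for_loop_inc_test_alt (n : Int) : Int :=
  if 0 < n then n * (n - 1) / 2 else 0

-- ===== PRECONDITION & SPEC =====
def Spec_for_loop_inc_test (n : Int) (out : Int) : Prop := out = for_loop_inc_test_alt n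
instance (n : Int) (out : Int) : Decidable (Spec_for_loop_inc_test n out) := by unfold Spec_for_loop_inc_test; infer_instance

-- ===== CLAIM (what is proved, stated in full; the proofs are below) =====
def Claim_equal_for_loop_inc_test : Prop := ∀ (n : Int), Dom_for_loop_inc_test n → Spec_for_loop_inc_test n (for_loop_inc_test n)

-- ===== LEMMAS AND PROOFS =====

-- ===== VERDICT (by name: the statement is the Claim_ definition above) =====
-- the fold's first component adds the list sum; the counter is irrelevant
theorem foldl_fst_sum (l : List Int) (s x : Int) :
    ((l.foldl (fun (st : Int × Int) i => (st.1 + i, st.2 + 1)) (s, x)).1) = s + l.sum := by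
  induction l generalizing s x with
  | nil => simp
  | cons a t ih => simp [List.foldl, ih, add_assoc]

-- Gauss: twice the sum of range(m) is m*(m-1)
theorem two_mul_sum_pyRange (m : Nat) :
    2 * (PySem.List.pyRange 0 (m : Int) 1).sum = (m : Int) * ((m : Int) - 1) := by
  induction m with
  | zero =>
      rw [PySem.List.pyRange_one_eq_nil (by norm_num)]
      norm_num
  | succ k ih =>
      push_cast
      rw [PySem.List.pyRange_one_succ_right (by positivity), List.sum_append]
      simp only [List.sum_cons, List.sum_nil, add_zero]
      linear_combination ih

-- ===== VERDICT =====
theorem for_loop_inc_test_spec : Claim_equal_for_loop_inc_test := by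
  intro n _
  unfold Spec_for_loop_inc_test for_loop_inc_test for_loop_inc_test_alt
  rw [foldl_fst_sum, zero_add]
  by_cases hn : 0 < n
  · rw [if_pos hn]
    have h := two_mul_sum_pyRange n.toNat
    rw [Int.toNat_of_nonneg hn.le] at h
    rw [← h, Int.mul_ediv_cancel_left _ (by norm_num)]
  · rw [if_neg hn]
    rw [PySem.List.pyRange_one_eq_nil (by omega)]
    simp
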